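-- pv_equiv track=rewrite | github.com/AI-460-School-of-Business/Enrollment-Predictor | backend/app/ml/train_model_old.py | _identify_key_columns
-- ===== SOURCE A (Python) =====
-- from typing import Dict, List, Tuple, Any, Optional
--
-- def _identify_key_columns(columns: List[str]) -> Dict[str, Optional[str]]:
--     """Identify key columns (Subject, Course, Term/Semester/Year, Enrollment) in a list of column names."""
--     key_cols = {
--         'subj': None,
--         'crse': None,
--         'term': None,
--         'semester': None,
--         'year': None,
--         'enrollment': None
--     }
--
--     for col in columns:
--         col_lower = col.lower()
--
--         if 'subj' in col_lower and key_cols['subj'] is None: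
--             key_cols['subj'] = col
--         elif ('crse' in col_lower or (col_lower == 'course' and 'crse' not in [c.lower() for c in columns])) and key_cols['crse'] is None:
--             key_cols['crse'] = col
--         elif (col_lower == 'term') and key_cols['term'] is None:
--             key_cols['term'] = col
--         elif ('semester' in col_lower) and key_cols['semester'] is None:
--             key_cols['semester'] = col
--         elif ('year' in col_lower) and key_cols['year'] is None:
--             key_cols['year'] = col
--         elif ('enrollment' in col_lower or 'headcount' in col_lower or col_lower == 'act') and key_cols['enrollment'] is None:
--             key_cols['enrollment'] = col
--
--     return key_cols
-- ===== SOURCE B (Python) =====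
-- def _identify_key_columns(columns):
--     """Role-major greedy matching: for each role in priority order, take the earliest
--     remaining column whose predicate matches and remove it from the pool."""
--     has_exact_crse = any(c.lower() == 'crse' for c in columns)
--     preds = [
--         ('subj', lambda cl: 'subj' in cl),
--         ('crse', lambda cl: 'crse' in cl or (cl == 'course' and not has_exact_crse)),
--         ('term', lambda cl: cl == 'term'),
--         ('semester', lambda cl: 'semester' in cl),
--         ('year', lambda cl: 'year' in cl),
--         ('enrollment', lambda cl: 'enrollment' in cl or 'headcount' in cl or cl == 'act'),
--     ]
--     remaining = list(columns)
--     result = {}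
--     for role, pred in preds:
--         found = None
--         for i, col in enumerate(remaining):
--             if pred(col.lower()):
--                 found = col
--                 del remaining[i]
--                 break
--         result[role] = found
--     return result
-- ===== Notes on version B (the rewrite author's own statement) =====
-- stated objective: alternative
-- what changed: Replaces A's column-major elif state machine by role-major greedy matching: for each role in priority order, pick the earliest remaining matching column and remove it from the pool (equivalence by a serial-dictatorship argument), with the exact-'crse' membership test precomputed once.
import Mathlib
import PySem

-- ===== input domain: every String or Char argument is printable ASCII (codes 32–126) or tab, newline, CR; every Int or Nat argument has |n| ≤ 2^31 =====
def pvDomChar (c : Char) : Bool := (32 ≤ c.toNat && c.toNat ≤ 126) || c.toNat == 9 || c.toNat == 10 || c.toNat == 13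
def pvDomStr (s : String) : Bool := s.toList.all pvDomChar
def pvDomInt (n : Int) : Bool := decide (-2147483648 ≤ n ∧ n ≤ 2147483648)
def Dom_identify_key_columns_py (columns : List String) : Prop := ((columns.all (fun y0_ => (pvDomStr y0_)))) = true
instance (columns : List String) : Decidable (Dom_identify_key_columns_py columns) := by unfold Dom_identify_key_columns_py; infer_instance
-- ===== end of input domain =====

-- B computes the same assignment role-major (for each role in priority order, take the earliest
-- remaining matching column and remove it) instead of A's column-major elif state machine (alternative).


-- ===== PORT A =====
-- state: the six dict values (subj, crse, term, semester, year, enrollment) in insertion order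
def identify_key_columns_py (columns : List String) : List (String × Option String) :=
  let st := columns.foldl (fun st col =>
    let cl := PySem.Str.lower col
    match st with
    | (s, c, t, se, y, e) =>
      if PySem.Str.isIn "subj" cl && s.isNone then (some col, c, t, se, y, e)
      else if (PySem.Str.isIn "crse" cl
                || (cl == "course" && !((columns.map PySem.Str.lower).contains "crse"))) && c.isNone then
        (s, some col, t, se, y, e)
      else if (cl == "term") && t.isNone then (s, c, some col, se, y, e)
      else if PySem.Str.isIn "semester" cl && se.isNone then (s, c, t, some col, y, e)
      else if PySem.Str.isIn "year" cl && y.isNone then (s, c, t, se, some col, e)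
      else if (PySem.Str.isIn "enrollment" cl || PySem.Str.isIn "headcount" cl || cl == "act")
                && e.isNone then (s, c, t, se, y, some col)
      else (s, c, t, se, y, e))
    ((none, none, none, none, none, none) : Option String × Option String × Option String × Option String × Option String × Option String)
  [("subj", st.1), ("crse", st.2.1), ("term", st.2.2.1), ("semester", st.2.2.2.1),
   ("year", st.2.2.2.2.1), ("enrollment", st.2.2.2.2.2)]

-- ===== PORT B =====
-- Source B's inner loop: first remaining column matching the predicate, removed from the pool
def pvExtract (p : String → Bool) : List String → Option String × List String
  | [] => (none, [])
  | c :: cs =>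
      if p c then (some c, cs)
      else
        let r := pvExtract p cs
        (r.1, c :: r.2)

-- Source B's (role, predicate) priority table
def pvPredTable (hasExactCrse : Bool) : List (String × (String → Bool)) :=
  [("subj", fun col => PySem.Str.isIn "subj" (PySem.Str.lower col)),
   ("crse", fun col => PySem.Str.isIn "crse" (PySem.Str.lower col)
                        || (PySem.Str.lower col == "course" && !hasExactCrse)),
   ("term", fun col => PySem.Str.lower col == "term"),
   ("semester", fun col => PySem.Str.isIn "semester" (PySem.Str.lower col)),
   ("year", fun col => PySem.Str.isIn "year" (PySem.Str.lower col)),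
   ("enrollment", fun col => PySem.Str.isIn "enrollment" (PySem.Str.lower col)
                        || PySem.Str.isIn "headcount" (PySem.Str.lower col)
                        || PySem.Str.lower col == "act")]

-- Source B's outer loop over roles
def pvGo : List (String × (String → Bool)) → List String → List (String × Option String)
  | [], _ => []
  | (role, p) :: ps, cols =>
      let r := pvExtract p cols
      (role, r.1) :: pvGo ps r.2

def identify_key_columns_py_alt (columns : List String) : List (String × Option String) :=
  let hasExactCrse := columns.any (fun c => PySem.Str.lower c == "crse")
  pvGo (pvPredTable hasExactCrse) columns

-- ===== PRECONDITION & SPEC =====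
def Spec_identify_key_columns_py (columns : List String) (out : List (String × Option String)) : Prop := out = identify_key_columns_py_alt columns
instance (columns : List String) (out : List (String × Option String)) : Decidable (Spec_identify_key_columns_py columns out) := by unfold Spec_identify_key_columns_py; infer_instance

-- ===== CLAIM (what is proved, stated in full; the proofs are below) =====
def Claim_equal_identify_key_columns_py : Prop := ∀ (columns : List String), Dom_identify_key_columns_py columns → Spec_identify_key_columns_py columns (identify_key_columns_py columns)

-- ===== LEMMAS AND PROOFS =====

-- A's per-iteration membership test equals B's precomputed one
theorem pv_crse_eq (columns : List String) :
    (columns.map PySem.Str.lower).contains "crse"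
      = columns.any (fun c => PySem.Str.lower c == "crse") := by
  induction columns with
  | nil => rfl
  | cons x xs ih =>
      simp only [List.map_cons, List.contains_cons, List.any_cons, ih]
      rw [Bool.beq_comm]

-- column-major assignment on a (role, predicate, slot) list: the generic form of A's elif chain
def pvAssign : List (String × (String → Bool) × Option String) → String →
    List (String × (String → Bool) × Option String)
  | [], _ => []
  | (role, p, o) :: rest, col =>
      if o.isNone && p col then (role, p, some col) :: rest
      else (role, p, o) :: pvAssign rest col

theorem pvAssign_foldl_nil (cols : List String) :
    cols.foldl pvAssign [] = [] := by
  induction cols with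
  | nil => rfl
  | cons c cs ih => simpa [pvAssign] using ih

theorem pvAssign_foldl_filled (cols : List String) (rest : List (String × (String → Bool) × Option String))
    (role : String) (p : String → Bool) (c : String) :
    cols.foldl pvAssign ((role, p, some c) :: rest)
      = (role, p, some c) :: cols.foldl pvAssign rest := by
  induction cols generalizing rest with
  | nil => rfl
  | cons x xs ih => simpa [pvAssign] using ih (pvAssign rest x)

-- serial-dictatorship decomposition: the head role gets the first matching column,
-- and the rest of the roles see the pool with that column removed
theorem pvAssign_foldl_head (cols : List String) (rest : List (String × (String → Bool) × Option String))
    (role : String) (p : String → Bool) :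
    cols.foldl pvAssign ((role, p, none) :: rest)
      = (role, p, (pvExtract p cols).1) :: (pvExtract p cols).2.foldl pvAssign rest := by
  induction cols generalizing rest with
  | nil => rfl
  | cons x xs ih =>
      by_cases h : p x
      · simp [pvAssign, pvExtract, h, pvAssign_foldl_filled]
      · simpa [pvAssign, pvExtract, h] using ih (pvAssign rest x)

-- B's role-major loop equals the column-major fold on the same (role, predicate) table
theorem pvGo_eq_foldl (preds : List (String × (String → Bool))) (cols : List String) :
    pvGo preds cols
      = (cols.foldl pvAssign (preds.map (fun rp => (rp.1, rp.2, none)))).map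
          (fun t => (t.1, t.2.2)) := by
  induction preds generalizing cols with
  | nil => simp [pvGo, pvAssign_foldl_nil]
  | cons rp ps ih =>
      obtain ⟨role, p⟩ := rp
      simp only [pvGo, List.map_cons, pvAssign_foldl_head, List.map]
      exact congrArg _ (ih (pvExtract p cols).2)

-- (role, predicate, slot) table written from A's tuple state
def pvTableSt (h : Bool)
    (st : Option String × Option String × Option String × Option String × Option String × Option String) :
    List (String × (String → Bool) × Option String) :=
  [("subj", (fun col => PySem.Str.isIn "subj" (PySem.Str.lower col)), st.1),
   ("crse", (fun col => PySem.Str.isIn "crse" (PySem.Str.lower col)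
                        || (PySem.Str.lower col == "course" && !h)), st.2.1),
   ("term", (fun col => PySem.Str.lower col == "term"), st.2.2.1),
   ("semester", (fun col => PySem.Str.isIn "semester" (PySem.Str.lower col)), st.2.2.2.1),
   ("year", (fun col => PySem.Str.isIn "year" (PySem.Str.lower col)), st.2.2.2.2.1),
   ("enrollment", (fun col => PySem.Str.isIn "enrollment" (PySem.Str.lower col)
                        || PySem.Str.isIn "headcount" (PySem.Str.lower col)
                        || PySem.Str.lower col == "act"), st.2.2.2.2.2)]

set_option maxHeartbeats 2000000 in
theorem pv_step_eq (h : Bool) (col : String)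
    (st : Option String × Option String × Option String × Option String × Option String × Option String) :
    pvAssign (pvTableSt h st) col
      = pvTableSt h
        (let cl := PySem.Str.lower col
         match st with
         | (s, c, t, se, y, e) =>
           if PySem.Str.isIn "subj" cl && s.isNone then (some col, c, t, se, y, e)
           else if (PySem.Str.isIn "crse" cl || (cl == "course" && !h)) && c.isNone then
             (s, some col, t, se, y, e)
           else if (cl == "term") && t.isNone then (s, c, some col, se, y, e)
           else if PySem.Str.isIn "semester" cl && se.isNone then (s, c, t, some col, y, e)
           else if PySem.Str.isIn "year" cl && y.isNone then (s, c, t, se, some col, e)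
           else if (PySem.Str.isIn "enrollment" cl || PySem.Str.isIn "headcount" cl || cl == "act")
                     && e.isNone then (s, c, t, se, y, some col)
           else (s, c, t, se, y, e)) := by
  obtain ⟨s, c, t, se, y, e⟩ := st
  simp only [pvAssign, pvTableSt, Bool.and_comm]
  split_ifs <;> simp_all

theorem pv_fold_eq (h : Bool) (cols : List String)
    (st : Option String × Option String × Option String × Option String × Option String × Option String) :
    cols.foldl pvAssign (pvTableSt h st)
      = pvTableSt h (cols.foldl (fun st col =>
          let cl := PySem.Str.lower col
          match st with
          | (s, c, t, se, y, e) =>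
            if PySem.Str.isIn "subj" cl && s.isNone then (some col, c, t, se, y, e)
            else if (PySem.Str.isIn "crse" cl || (cl == "course" && !h)) && c.isNone then
              (s, some col, t, se, y, e)
            else if (cl == "term") && t.isNone then (s, c, some col, se, y, e)
            else if PySem.Str.isIn "semester" cl && se.isNone then (s, c, t, some col, y, e)
            else if PySem.Str.isIn "year" cl && y.isNone then (s, c, t, se, some col, e)
            else if (PySem.Str.isIn "enrollment" cl || PySem.Str.isIn "headcount" cl || cl == "act")
                      && e.isNone then (s, c, t, se, y, some col)
            else (s, c, t, se, y, e)) st) := by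
  induction cols generalizing st with
  | nil => rfl
  | cons x xs ih => simp only [List.foldl_cons, pv_step_eq, ih]

-- ===== VERDICT (by name: the statement is the Claim_ definition above) =====
theorem identify_key_columns_py_spec : Claim_equal_identify_key_columns_py := by
  intro columns _
  unfold Spec_identify_key_columns_py identify_key_columns_py identify_key_columns_py_alt
  rw [pv_crse_eq, pvGo_eq_foldl]
  rw [show (pvPredTable (columns.any fun c => PySem.Str.lower c == "crse")).map
        (fun rp => (rp.1, rp.2, none))
      = pvTableSt (columns.any fun c => PySem.Str.lower c == "crse")
          (none, none, none, none, none, none) from rfl]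
  rw [pv_fold_eq]
  rfl
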